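-- pv_equiv track=rewrite | github.com/smspillaz/reading | update_index.py | delete_ranges
-- ===== SOURCE A (Python) =====
-- import itertools
--
-- def pairwise(iterable):
--     a, b = itertools.tee(iterable)
--     next(b, None)
--     return zip(a, b)
--
-- def delete_ranges(content, ranges_to_delete):
--     if not ranges_to_delete:
--         return content
--
--     return "".join(
--         [content[: ranges_to_delete[0][0]]]
--         + [content[e1:b2] for (b1, e1), (b2, e2) in pairwise(ranges_to_delete)]
--         + [content[ranges_to_delete[-1][-1] :]]
--     )
-- ===== SOURCE B (Python) =====
-- def delete_ranges(content, ranges_to_delete):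
--     # Build the result back-to-front: walk the ranges in reverse, keeping the
--     # begin of the range to the right as the right cursor, prepending each kept
--     # piece to the accumulated suffix.
--     acc = ""
--     nxt = None
--     for b, e in reversed(ranges_to_delete):
--         acc = content[e:nxt] + acc
--         nxt = b
--     return content[:nxt] + acc
-- ===== Notes on version B (the rewrite author's own statement) =====
-- stated objective: alternative
-- what changed: Builds the output back-to-front: iterates the ranges in reverse with a right-cursor (the begin of the following range), prepending each kept slice to the accumulated suffix string, instead of A's forward prefix-slice + pairwise-zip gap list + suffix-slice joined at the end; no list of parts, no join, no empty-list early return.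
import Mathlib
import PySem

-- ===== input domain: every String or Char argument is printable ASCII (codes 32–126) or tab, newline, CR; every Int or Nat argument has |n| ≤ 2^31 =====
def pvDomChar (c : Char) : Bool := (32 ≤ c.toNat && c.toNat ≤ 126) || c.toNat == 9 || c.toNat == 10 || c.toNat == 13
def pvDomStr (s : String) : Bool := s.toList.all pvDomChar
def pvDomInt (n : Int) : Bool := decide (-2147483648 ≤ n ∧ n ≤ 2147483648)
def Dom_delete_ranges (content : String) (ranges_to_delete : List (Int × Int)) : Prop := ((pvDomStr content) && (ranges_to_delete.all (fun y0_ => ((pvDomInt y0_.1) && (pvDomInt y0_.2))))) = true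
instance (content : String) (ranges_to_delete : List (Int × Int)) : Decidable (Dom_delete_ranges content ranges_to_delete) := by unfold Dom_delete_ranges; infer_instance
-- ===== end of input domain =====

-- B builds the output back-to-front over the reversed ranges with a right cursor, instead of
-- A's forward prefix/pairwise-gap/suffix list joined at the end (alternative decomposition; same cost).

-- ===== PORT A =====
-- pairwise(rs) = zip(rs, rs[1:]) = rs.zip rs.tail; '+' on Python strings is ported as PySem.Str.join "" [·, ·] (exact)
def delete_ranges (content : String) (ranges_to_delete : List (Int × Int)) : String :=
  if ranges_to_delete.isEmpty then content
  else
    PySem.Str.join ""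
      ([PySem.Str.slice content none (some (ranges_to_delete.head!).1)]
        ++ (ranges_to_delete.zip ranges_to_delete.tail).map
             (fun p => PySem.Str.slice content (some p.1.2) (some p.2.1))
        ++ [PySem.Str.slice content (some (ranges_to_delete.getLast!).2) none])

-- ===== PORT B =====
-- reversed(rs) → foldl over rs.reverse; state = (acc, nxt); content[e:nxt] with nxt possibly None → slice with Option bound
def delete_ranges_alt (content : String) (ranges_to_delete : List (Int × Int)) : String :=
  let st := ranges_to_delete.reverse.foldl
      (fun (st : String × Option Int) r =>
        (PySem.Str.join "" [PySem.Str.slice content (some r.2) st.2, st.1], some r.1))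
      ("", none)
  PySem.Str.join "" [PySem.Str.slice content none st.2, st.1]

-- ===== PRECONDITION & SPEC =====
def Spec_delete_ranges (content : String) (ranges_to_delete : List (Int × Int)) (out : String) : Prop := out = delete_ranges_alt content ranges_to_delete
instance (content : String) (ranges_to_delete : List (Int × Int)) (out : String) : Decidable (Spec_delete_ranges content ranges_to_delete out) := by unfold Spec_delete_ranges; infer_instance

-- ===== CLAIM (what is proved, stated in full; the proofs are below) =====
def Claim_equal_delete_ranges : Prop := ∀ (content : String) (ranges_to_delete : List (Int × Int)), Dom_delete_ranges content ranges_to_delete → Spec_delete_ranges content ranges_to_delete (delete_ranges content ranges_to_delete)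

-- ===== LEMMAS AND PROOFS =====

-- Python string '+', as used in B's port
def pvApp (s t : String) : String := PySem.Str.join "" [s, t]

theorem pvApp_toList (s t : String) : (pvApp s t).toList = s.toList ++ t.toList := by
  simp [pvApp, PySem.Str.toList_join, PySem.Chars.join_cons_cons, PySem.Chars.join_singleton]

theorem pvJoin_cons (x : String) (l : List String) :
    PySem.Str.join "" (x :: l) = pvApp x (PySem.Str.join "" l) := by
  apply String.toList_injective
  rw [pvApp_toList]
  simp only [PySem.Str.toList_join, List.map_cons]
  cases l with
  | nil => simp [PySem.Chars.join, List.intercalate]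
  | cons y ys => simp [PySem.Chars.join_cons_cons]

-- the list of kept pieces, the left bound of the first one being `a?`
def pvGaps (content : String) (a? : Option Int) : List (Int × Int) → List String
  | [] => [PySem.Str.slice content a? none]
  | (b, e) :: rest => PySem.Str.slice content a? (some b) :: pvGaps content (some e) rest

-- B-side: the reversed fold realises the joined gap list
def pvStep (content : String) (r : Int × Int) (st : String × Option Int) : String × Option Int :=
  (pvApp (PySem.Str.slice content (some r.2) st.2) st.1, some r.1)

theorem pvFoldr_eq (content : String) (rs : List (Int × Int)) :
    ∀ a? : Option Int,
      pvApp (PySem.Str.slice content a? (rs.foldr (pvStep content) ("", none)).2)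
        (rs.foldr (pvStep content) ("", none)).1
      = PySem.Str.join "" (pvGaps content a? rs) := by
  induction rs with
  | nil =>
      intro a?
      rw [show pvGaps content a? [] = [PySem.Str.slice content a? none] from rfl, pvJoin_cons]
      apply String.toList_injective
      simp [pvApp_toList, PySem.Str.toList_join, PySem.Chars.join, List.intercalate]
  | cons r rest ih =>
      intro a?
      obtain ⟨b, e⟩ := r
      rw [show pvGaps content a? ((b, e) :: rest)
            = PySem.Str.slice content a? (some b) :: pvGaps content (some e) rest from rfl,
          pvJoin_cons, ← ih (some e)]
      rfl

theorem pvAlt_eq (content : String) (rs : List (Int × Int)) :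
    delete_ranges_alt content rs = PySem.Str.join "" (pvGaps content none rs) := by
  unfold delete_ranges_alt
  rw [List.foldl_reverse]
  exact pvFoldr_eq content rs none

-- A-side: the pairwise-zip gap pieces plus the suffix piece are the tail of the gap list
theorem pvZip_eq (content : String) (rest : List (Int × Int)) :
    ∀ (b e : Int),
      ((( (b, e) :: rest).zip rest).map
          (fun p => PySem.Str.slice content (some p.1.2) (some p.2.1)))
        ++ [PySem.Str.slice content (some (((b, e) :: rest).getLast!).2) none]
      = pvGaps content (some e) rest := by
  induction rest with
  | nil => intro b e; simp [pvGaps, List.getLast!]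
  | cons r2 rest' ih =>
      intro b e
      obtain ⟨b2, e2⟩ := r2
      simpa [pvGaps, List.zip_cons_cons, List.getLast!] using ih b2 e2

-- ===== VERDICT (by name: the statement is the Claim_ definition above) =====
theorem delete_ranges_spec : Claim_equal_delete_ranges := by
  intro content rs _
  unfold Spec_delete_ranges
  rw [pvAlt_eq]
  cases rs with
  | nil =>
      simp [delete_ranges, pvGaps, PySem.Str.slice, PySem.Str.join]
  | cons r rest =>
      obtain ⟨b, e⟩ := r
      unfold delete_ranges
      rw [show pvGaps content none ((b, e) :: rest)
            = PySem.Str.slice content none (some b) :: pvGaps content (some e) rest from rfl,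
          ← pvZip_eq content rest b e]
      simp
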